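-- pv_equiv track=rewrite | github.com/Series-Diff/Series-diff | Flask-API/services/time_series_manager.py | _filter_files_in_category
-- ===== SOURCE A (Python) =====
-- from typing import Any, Dict, List, Optional
--
-- def _filter_files_in_category(
--
--     files_data: Dict[str, Any],
--     target_filename: Optional[str],
--     target_filenames_list: Optional[List[str]],
-- ) -> Dict[str, Any]:
--     """
--     Helper method to filter files within a category.
--     Reduces complexity of _add_matching_data.
--     """
--     filtered_files = {}
--     for file_name, value in files_data.items():
--         if target_filename and file_name != target_filename:
--             continue
--         if target_filenames_list and file_name not in target_filenames_list:
--             continue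
--         filtered_files[file_name] = value
--     return filtered_files
-- ===== SOURCE B (Python) =====
-- def _filter_files_in_category(files_data, target_filename, target_filenames_list):
--     if target_filename:
--         if target_filename in files_data and (
--             not target_filenames_list or target_filename in target_filenames_list
--         ):
--             return {target_filename: files_data[target_filename]}
--         return {}
--     if not target_filenames_list:
--         return dict(files_data)
--     return {name: value for name, value in files_data.items()
--             if name in target_filenames_list}
-- ===== Notes on version B (the rewrite author's own statement) =====
-- stated objective: alternative
-- what changed: A scans every dict entry through two continue-tests and rebuilds a dict; B splits on the truthiness of target_filename: a single direct dict lookup (plus one allowed-list membership test) when it is truthy, otherwise a plain subset filter (or a copy when the allowed list is falsy), with no per-entry target comparison.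
import Mathlib
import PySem

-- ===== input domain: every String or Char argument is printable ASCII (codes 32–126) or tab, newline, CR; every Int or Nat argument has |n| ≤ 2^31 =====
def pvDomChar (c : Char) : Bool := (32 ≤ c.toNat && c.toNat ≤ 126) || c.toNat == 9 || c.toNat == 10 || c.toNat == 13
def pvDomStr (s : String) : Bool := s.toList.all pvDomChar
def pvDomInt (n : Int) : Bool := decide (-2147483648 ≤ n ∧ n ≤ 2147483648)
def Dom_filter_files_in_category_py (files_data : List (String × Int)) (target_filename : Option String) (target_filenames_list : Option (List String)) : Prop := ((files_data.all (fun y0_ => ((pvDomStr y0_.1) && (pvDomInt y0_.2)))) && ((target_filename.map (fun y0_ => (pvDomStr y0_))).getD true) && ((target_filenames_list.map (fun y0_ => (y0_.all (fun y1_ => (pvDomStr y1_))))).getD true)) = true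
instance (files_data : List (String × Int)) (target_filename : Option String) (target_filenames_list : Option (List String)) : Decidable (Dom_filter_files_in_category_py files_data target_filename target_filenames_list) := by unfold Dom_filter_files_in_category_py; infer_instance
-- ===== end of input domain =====

-- B replaces A's scan-and-test loop by a direct single-key dict lookup when target_filename is truthy,
-- and a plain subset filter otherwise (objective: alternative decomposition).


-- ===== PORT A =====
-- literal port: filtered_files is a dict built by insertion; the two 'continue' tests stay in order
def filter_files_in_category_py (files_data : List (String × Int)) (target_filename : Option String) (target_filenames_list : Option (List String)) : List (String × Int) :=
  (files_data.foldl (fun (d : PySem.Dict String Int) p =>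
      if (match target_filename with | some s => s != "" && p.1 != s | none => false) then d
      else if (match target_filenames_list with | some l => !l.isEmpty && !l.contains p.1 | none => false) then d
      else d.insert p.1 p.2) PySem.Dict.empty).items

-- ===== PORT B =====
-- 'not target_filenames_list or k in target_filenames_list'
def pvAllowed (target_filenames_list : Option (List String)) (k : String) : Bool :=
  match target_filenames_list with
  | some l => l.isEmpty || l.contains k
  | none => true

-- the falsy-target branch: dict(files_data) or the comprehension keeping allowed keys
def pvSubset (files_data : List (String × Int)) (target_filenames_list : Option (List String)) : List (String × Int) :=
  match target_filenames_list with
  | none => files_data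
  | some l => if l.isEmpty then files_data else files_data.filter (fun p => l.contains p.1)

def filter_files_in_category_py_alt (files_data : List (String × Int)) (target_filename : Option String) (target_filenames_list : Option (List String)) : List (String × Int) :=
  match target_filename with
  | some s =>
      if s != "" then
        match files_data.find? (fun p => p.1 == s) with   -- 'target_filename in files_data' + files_data[target_filename]
        | some q => if pvAllowed target_filenames_list s then [(s, q.2)] else []
        | none => []
      else pvSubset files_data target_filenames_list
  | none => pvSubset files_data target_filenames_list

-- ===== PRECONDITION & SPEC =====
-- Pre_ only states the dict shape: the keys of files_data are distinct, as they are for every Python dict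
-- (an association list with duplicate keys cannot arise from the Python function's dict argument).
def Pre_filter_files_in_category_py (files_data : List (String × Int)) (target_filename : Option String) (target_filenames_list : Option (List String)) : Prop :=
  (files_data.map Prod.fst).Nodup
instance (files_data : List (String × Int)) (target_filename : Option String) (target_filenames_list : Option (List String)) : Decidable (Pre_filter_files_in_category_py files_data target_filename target_filenames_list) := by unfold Pre_filter_files_in_category_py; infer_instance

def pvWitness_filter_files_in_category_py : (List (String × Int)) × Option String × Option (List String) :=
  ([("a", 1), ("b", 2)], some "a", some ["a", "c"])

def Spec_filter_files_in_category_py (files_data : List (String × Int)) (target_filename : Option String) (target_filenames_list : Option (List String)) (out : List (String × Int)) : Prop := out = filter_files_in_category_py_alt files_data target_filename target_filenames_list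
instance (files_data : List (String × Int)) (target_filename : Option String) (target_filenames_list : Option (List String)) (out : List (String × Int)) : Decidable (Spec_filter_files_in_category_py files_data target_filename target_filenames_list out) := by unfold Spec_filter_files_in_category_py; infer_instance

-- ===== CLAIM (what is proved, stated in full; the proofs are below) =====
def Claim_equal_filter_files_in_category_py : Prop := ∀ (files_data : List (String × Int)) (target_filename : Option String) (target_filenames_list : Option (List String)), Dom_filter_files_in_category_py files_data target_filename target_filenames_list → Pre_filter_files_in_category_py files_data target_filename target_filenames_list → Spec_filter_files_in_category_py files_data target_filename target_filenames_list (filter_files_in_category_py files_data target_filename target_filenames_list)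

-- ===== LEMMAS AND PROOFS =====

-- the combined keep-test of A's two 'continue's (branches in A's order)
def pvKeep (target_filename : Option String) (target_filenames_list : Option (List String)) (k : String) : Bool :=
  !(match target_filename with | some s => s != "" && k != s | none => false)
  && !(match target_filenames_list with | some l => !l.isEmpty && !l.contains k | none => false)

-- A's two 'continue's are the single combined keep-test pvKeep
lemma pv_if_if {α δ : Type} (c1 c2 : α → Bool) (f : δ → α → δ) :
    (fun (d : δ) (x : α) => if c1 x then d else if c2 x then d else f d x)
      = (fun d x => if !c1 x && !c2 x then f d x else d) := by
  funext d x
  by_cases h1 : c1 x <;> by_cases h2 : c2 x <;> simp [h1, h2]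

-- A's loop is a filter of files_data (keys distinct, so every insert appends a fresh key)
lemma pvA_eq_filter (files_data : List (String × Int)) (target_filename : Option String) (target_filenames_list : Option (List String))
    (h : (files_data.map Prod.fst).Nodup) :
    filter_files_in_category_py files_data target_filename target_filenames_list
      = files_data.filter (fun p => pvKeep target_filename target_filenames_list p.1) := by
  unfold filter_files_in_category_py
  rw [pv_if_if, PySem.List.foldl_if_eq_foldl_filter]
  refine (PySem.Dict.items_foldl_insert_fresh _ _ _ _ ?_ ?_).trans ?_
  · intro a _; simp
  · exact h.sublist (List.Sublist.map Prod.fst List.filter_sublist)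
  · simp [pvKeep, PySem.Dict.empty]

-- filtering a nodup-keyed list for one key is the first (only) match
lemma pv_filter_find (s : String) (fd : List (String × Int)) (h : (fd.map Prod.fst).Nodup) :
    fd.filter (fun p => p.1 == s)
      = (match fd.find? (fun p => p.1 == s) with
         | some q => [q]
         | none => ([] : List (String × Int))) := by
  induction fd with
  | nil => simp
  | cons a rest ih =>
    simp only [List.map_cons, List.nodup_cons] at h
    by_cases ha : a.1 = s
    · have hrest : rest.filter (fun p => p.1 == s) = [] := by
        rw [List.filter_eq_nil_iff]
        intro p hp hps
        have hp1 : p.1 = a.1 := by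
          have : p.1 = s := by simpa using hps
          rw [this, ha]
        exact h.1 (hp1 ▸ List.mem_map_of_mem hp)
      simp [ha, hrest]
    · simp [ha, ih h.2]

lemma pvKeep_allowed (s : String) (tl : Option (List String)) (hs : s ≠ "")
    (hall : pvAllowed tl s = true) (k : String) :
    pvKeep (some s) tl k = (k == s) := by
  by_cases hk : k = s
  · subst hk
    cases tl with
    | none => simp [pvKeep]
    | some l =>
        rcases (by simpa [pvAllowed] using hall : l = [] ∨ k ∈ l) with rfl | hC
        · simp [pvKeep]
        · simp [pvKeep, hC]
  · have h1 : (!(s != "")) = false := by simp [hs]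
    have h2 : (!(k != s)) = false := by simp [hk]
    have h3 : (k == s) = false := by simp [hk]
    simp [pvKeep, h1, h2, h3]

lemma pvKeep_notallowed (s : String) (tl : Option (List String)) (hs : s ≠ "")
    (hall : pvAllowed tl s = false) (k : String) :
    pvKeep (some s) tl k = false := by
  cases tl with
  | none => simp [pvAllowed] at hall
  | some l =>
      have h' : ¬l = [] ∧ ¬s ∈ l := by simpa [pvAllowed] using hall
      by_cases hk : k = s
      · subst hk
        simp [pvKeep, h'.1, h'.2]
      · simp [pvKeep, hs, hk]

-- ===== VERDICT (by name: the statement is the Claim_ definition above) =====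
theorem filter_files_in_category_py_spec : Claim_equal_filter_files_in_category_py := by
  intro fd t tl _hdom hpre
  unfold Spec_filter_files_in_category_py
  rw [pvA_eq_filter fd t tl hpre]
  have falsy : ∀ tl', fd.filter (fun p => pvKeep none tl' p.1) = pvSubset fd tl' := by
    intro tl'
    cases tl' with
    | none => simp [pvKeep, pvSubset]
    | some l =>
        by_cases hl : l.isEmpty <;> simp [pvKeep, pvSubset, hl]
  cases t with
  | none => simpa [filter_files_in_category_py_alt] using falsy tl
  | some s =>
      by_cases hs : s = ""
      · subst hs
        have : ∀ k, pvKeep (some "") tl k = pvKeep none tl k := by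
          intro k; simp [pvKeep]
        rw [List.filter_congr (fun p _ => this p.1)]
        simpa [filter_files_in_category_py_alt] using falsy tl
      · have hs' : (s != "") = true := by simpa using hs
        by_cases hall : pvAllowed tl s
        · rw [List.filter_congr (fun p _ => pvKeep_allowed s tl hs hall p.1),
              pv_filter_find s fd hpre]
          cases hfind : fd.find? (fun p => p.1 == s) with
          | none => simp [filter_files_in_category_py_alt, hs', hfind]
          | some q =>
              obtain ⟨k, v⟩ := q
              have hq : k = s := by simpa using List.find?_some hfind
              subst hq
              simp [filter_files_in_category_py_alt, hs', hfind, hall]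
        · have hall' : pvAllowed tl s = false := by
            simpa using hall
          rw [List.filter_congr (fun p _ => pvKeep_notallowed s tl hs hall' p.1)]
          cases hfind : fd.find? (fun p => p.1 == s) with
          | none => simp [filter_files_in_category_py_alt, hs', hfind]
          | some q => simp [filter_files_in_category_py_alt, hs', hfind, hall']
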